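-- pv_equiv track=rewrite | github.com/QuangPhung15/CompetitiveProgramming | codeforce/800/Ten Words of Wisdom.py | solve
-- ===== SOURCE A (Python) =====
-- def solve(n, responses):
-- 	res = 0
-- 	mx = 0
--
-- 	for i, (a, b) in enumerate(responses):
-- 		if (a <= 10 and b > mx):
-- 			res = i + 1
-- 			mx = b
--
-- 	return res
-- ===== SOURCE B (Python) =====
-- def solve(n, responses):
--     # Divide-and-conquer tournament over index ranges [lo, hi):
--     # each segment reports its (best_score, answer_index) pair,
--     # combined with a left-biased max so the first maximum wins.
--     def best(lo, hi):
--         if hi <= lo: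
--             return (0, 0)
--         if hi - lo == 1:
--             a, b = responses[lo]
--             return (b, lo + 1) if a <= 10 and b > 0 else (0, 0)
--         mid = (lo + hi) // 2
--         l = best(lo, mid)
--         r = best(mid, hi)
--         return l if r[0] <= l[0] else r
--     return best(0, len(responses))[1]
-- ===== Notes on version B (the rewrite author's own statement) =====
-- stated objective: alternative
-- what changed: Replaces the linear best-so-far scan with a divide-and-conquer tournament over index ranges: each half reports its (best score, answer index) pair and the halves are merged with a left-biased max, so the first maximum still wins.
import Mathlib
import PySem

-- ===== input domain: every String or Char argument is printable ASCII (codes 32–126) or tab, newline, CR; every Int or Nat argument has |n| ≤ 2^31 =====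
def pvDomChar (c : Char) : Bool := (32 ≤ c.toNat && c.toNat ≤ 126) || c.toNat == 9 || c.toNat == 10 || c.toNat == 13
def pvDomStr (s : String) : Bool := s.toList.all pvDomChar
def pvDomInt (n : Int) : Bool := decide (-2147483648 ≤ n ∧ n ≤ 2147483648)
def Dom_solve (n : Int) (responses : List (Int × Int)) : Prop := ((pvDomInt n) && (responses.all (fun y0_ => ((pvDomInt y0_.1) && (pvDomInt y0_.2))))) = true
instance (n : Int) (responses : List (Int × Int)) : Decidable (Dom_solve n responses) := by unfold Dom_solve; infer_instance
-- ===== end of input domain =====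

-- B replaces A's linear best-so-far scan by a divide-and-conquer tournament over index
-- ranges with a left-biased max merge; same value everywhere, objective: alternative.

-- ===== PORT A =====
-- literal port of A: one loop over enumerate(responses) threading (res, mx)
def solve (n : Int) (responses : List (Int × Int)) : Int :=
  ((PySem.List.enumerate responses 0).foldl
    (fun (st : Int × Int) (p : Int × Int × Int) =>
      if p.2.1 ≤ 10 ∧ st.2 < p.2.2 then (p.1 + 1, p.2.2) else st)
    (0, 0)).1

-- ===== PORT B =====
-- literal port of Source B's inner best(lo, hi): divide and conquer on the half-open range
-- [lo, hi); indices are Nat since Python's lo, hi stay in [0, len(responses)]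
def pvBestDC (responses : List (Int × Int)) (lo hi : Nat) : Int × Int :=
  if hi ≤ lo then (0, 0)
  else if hi - lo = 1 then
    match PySem.List.pyGet? responses (lo : Int) with
    | some (a, b) => if a ≤ 10 ∧ 0 < b then (b, (lo : Int) + 1) else (0, 0)
    | none => (0, 0)   -- unreachable: lo < len(responses)
  else
    let mid := (lo + hi) / 2
    let L := pvBestDC responses lo mid
    let R := pvBestDC responses mid hi
    if R.1 ≤ L.1 then L else R
termination_by hi - lo
decreasing_by all_goals omega

def solve_alt (n : Int) (responses : List (Int × Int)) : Int :=
  (pvBestDC responses 0 responses.length).2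

-- ===== PRECONDITION & SPEC =====
def Spec_solve (n : Int) (responses : List (Int × Int)) (out : Int) : Prop := out = solve_alt n responses
instance (n : Int) (responses : List (Int × Int)) (out : Int) : Decidable (Spec_solve n responses out) := by unfold Spec_solve; infer_instance

-- ===== CLAIM (what is proved, stated in full; the proofs are below) =====
def Claim_equal_solve : Prop := ∀ (n : Int) (responses : List (Int × Int)), Dom_solve n responses → Spec_solve n responses (solve n responses)

-- ===== LEMMAS AND PROOFS =====

-- A's loop step
def pvStepA (st : Int × Int) (p : Int × Int × Int) : Int × Int :=
  if p.2.1 ≤ 10 ∧ st.2 < p.2.2 then (p.1 + 1, p.2.2) else st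

-- left-biased max combine (B's merge)
def pvComb (x y : Int × Int) : Int × Int := if x.1 < y.1 then y else x

-- candidate of one entry
def pvLeaf (lo : Nat) (p : Int × Int) : Int × Int :=
  if p.1 ≤ 10 ∧ 0 < p.2 then (p.2, (lo : Int) + 1) else (0, 0)

def pvLeafIdx (l : List (Int × Int)) (lo : Nat) : Int × Int :=
  match l[lo]? with
  | some p => pvLeaf lo p
  | none => (0, 0)

-- linear (right-recursive) reference computation, index form and list form
def pvLin (l : List (Int × Int)) (lo hi : Nat) : Int × Int :=
  if hi ≤ lo then (0, 0) else pvComb (pvLeafIdx l lo) (pvLin l (lo + 1) hi)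
termination_by hi - lo
decreasing_by omega

def pvLinL : List (Int × Int) → Nat → Int × Int
  | [], _ => (0, 0)
  | p :: t, lo => pvComb (pvLeaf lo p) (pvLinL t (lo + 1))

-- reachable values: positive score, or the neutral pair (0,0)
def pvS (p : Int × Int) : Prop := 0 < p.1 ∨ p = (0, 0)

theorem pvComb_assoc (x y z : Int × Int) :
    pvComb (pvComb x y) z = pvComb x (pvComb y z) := by
  unfold pvComb; split_ifs <;> first | rfl | omega

theorem pvS_comb {x y : Int × Int} (hx : pvS x) (hy : pvS y) : pvS (pvComb x y) := by
  unfold pvComb; split_ifs <;> assumption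

theorem pvS_leaf (lo : Nat) (p : Int × Int) : pvS (pvLeaf lo p) := by
  unfold pvLeaf pvS; split_ifs with h
  · exact Or.inl h.2
  · exact Or.inr rfl

theorem pvS_leafIdx (l : List (Int × Int)) (lo : Nat) : pvS (pvLeafIdx l lo) := by
  unfold pvLeafIdx
  cases l[lo]? with
  | none => exact Or.inr rfl
  | some p => exact pvS_leaf lo p

theorem pvComb_zero_left {x : Int × Int} (hx : pvS x) : pvComb (0, 0) x = x := by
  unfold pvComb
  rcases hx with h | h
  · simp [h]
  · simp [h]

theorem pvComb_zero_right {x : Int × Int} (hx : pvS x) : pvComb x (0, 0) = x := by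
  unfold pvComb
  rcases hx with h | h
  · have hne : ¬ x.1 < 0 := by omega
    simp [hne]
  · simp [h]

theorem pvS_lin (l : List (Int × Int)) (lo hi : Nat) : pvS (pvLin l lo hi) := by
  rw [pvLin]
  split_ifs with h
  · exact Or.inr rfl
  · exact pvS_comb (pvS_leafIdx l lo) (pvS_lin l (lo + 1) hi)
termination_by hi - lo
decreasing_by omega

theorem pvS_linL (l : List (Int × Int)) (lo : Nat) : pvS (pvLinL l lo) := by
  induction l generalizing lo with
  | nil => exact Or.inr rfl
  | cons p t ih => exact pvS_comb (pvS_leaf lo p) (ih (lo + 1))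

theorem pvLin_nil (l : List (Int × Int)) (lo hi : Nat) (h : hi ≤ lo) :
    pvLin l lo hi = (0, 0) := by
  rw [pvLin]; simp [h]

theorem pvLin_cons (l : List (Int × Int)) (lo hi : Nat) (h : lo < hi) :
    pvLin l lo hi = pvComb (pvLeafIdx l lo) (pvLin l (lo + 1) hi) := by
  rw [pvLin]; simp [Nat.not_le.mpr h]

theorem pvLin_split (l : List (Int × Int)) :
    ∀ (k lo mid hi : Nat), mid - lo = k → lo ≤ mid → mid ≤ hi →
      pvLin l lo hi = pvComb (pvLin l lo mid) (pvLin l mid hi) := by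
  intro k
  induction k with
  | zero =>
      intro lo mid hi hk h1 h2
      have hml : mid = lo := by omega
      subst hml
      rw [pvLin_nil l mid mid (le_refl mid), pvComb_zero_left (pvS_lin l mid hi)]
  | succ k ih =>
      intro lo mid hi hk h1 h2
      have hlo : lo < mid := by omega
      rw [pvLin_cons l lo hi (by omega), ih (lo + 1) mid hi (by omega) (by omega) h2,
          ← pvComb_assoc, ← pvLin_cons l lo mid hlo]

theorem pvBestDC_eq_lin (l : List (Int × Int)) :
    ∀ (d lo hi : Nat), hi - lo = d → pvBestDC l lo hi = pvLin l lo hi := by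
  intro d
  induction d using Nat.strong_induction_on with
  | _ d ih =>
      intro lo hi hd
      rw [pvBestDC]
      split_ifs with h1 h2
      · rw [pvLin_nil l lo hi h1]
      · -- singleton segment
        have hhi : hi = lo + 1 := by omega
        subst hhi
        rw [pvLin_cons l lo (lo + 1) (by omega), pvLin_nil l (lo + 1) (lo + 1) (le_refl _),
            pvComb_zero_right (pvS_leafIdx l lo)]
        rw [PySem.List.pyGet?_natCast l lo]
        unfold pvLeafIdx
        cases l[lo]? with
        | none => rfl
        | some p => rcases p with ⟨a, b⟩; rfl
      · have hL := ih ((lo + hi) / 2 - lo) (by omega) lo ((lo + hi) / 2) rfl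
        have hR := ih (hi - (lo + hi) / 2) (by omega) ((lo + hi) / 2) hi rfl
        show (if (pvBestDC l ((lo + hi) / 2) hi).1 ≤ (pvBestDC l lo ((lo + hi) / 2)).1
              then pvBestDC l lo ((lo + hi) / 2) else pvBestDC l ((lo + hi) / 2) hi)
            = pvLin l lo hi
        rw [hL, hR,
            pvLin_split l ((lo + hi) / 2 - lo) lo ((lo + hi) / 2) hi rfl (by omega) (by omega)]
        rcases pvLin l lo ((lo + hi) / 2) with ⟨x1, x2⟩
        rcases pvLin l ((lo + hi) / 2) hi with ⟨y1, y2⟩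
        unfold pvComb
        split_ifs <;> first | rfl | omega

theorem pvLin_eq_linL (l : List (Int × Int)) :
    ∀ (t : List (Int × Int)) (lo : Nat), l.drop lo = t → pvLin l lo l.length = pvLinL t lo := by
  intro t
  induction t with
  | nil =>
      intro lo h
      exact (pvLin_nil l lo l.length (List.drop_eq_nil_iff.mp h)).trans rfl
  | cons p t ih =>
      intro lo h
      have hlt : lo < l.length := by
        by_contra hc
        rw [List.drop_eq_nil_iff.mpr (by omega)] at h
        exact List.cons_ne_nil p t h.symm
      have hget : l[lo]? = some p := by
        have hh := congrArg List.head? h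
        rwa [List.head?_drop] at hh
      have hdrop : l.drop (lo + 1) = t := by
        have hh := congrArg List.tail h
        rwa [List.tail_drop] at hh
      rw [pvLin_cons l lo l.length hlt, ih (lo + 1) hdrop]
      simp [pvLeafIdx, hget, pvLinL]

-- A-side: one step of A's loop is a left-biased combine with the entry's candidate
theorem pvStepA_comb (lo : Nat) (mx res a b : Int) (hmx : 0 ≤ mx) :
    pvStepA (res, mx) ((lo : Int), a, b)
      = ((pvComb (mx, res) (pvLeaf lo (a, b))).2, (pvComb (mx, res) (pvLeaf lo (a, b))).1) := by
  by_cases hc : a ≤ 10 ∧ 0 < b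
  · by_cases hb : mx < b
    · simp [pvStepA, pvLeaf, pvComb, hc, hb]
    · have hA : ¬ (a ≤ 10 ∧ mx < b) := fun hh => hb hh.2
      simp [pvStepA, pvLeaf, pvComb, hc, hb]
  · have hA : ¬ (a ≤ 10 ∧ mx < b) := fun hh => hc ⟨hh.1, lt_of_le_of_lt hmx hh.2⟩
    have h0 : ¬ mx < (0 : Int) := by omega
    simp [pvStepA, pvLeaf, pvComb, hc, hA, h0]

-- A-side: the left fold with (res, mx) state equals the left-biased max combine
theorem pvFoldA (l : List (Int × Int)) :
    ∀ (lo : Nat) (mx res : Int), pvS (mx, res) →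
      (PySem.List.enumerate l (lo : Int)).foldl pvStepA (res, mx)
        = ((pvComb (mx, res) (pvLinL l lo)).2, (pvComb (mx, res) (pvLinL l lo)).1) := by
  induction l with
  | nil =>
      intro lo mx res hS
      rw [show pvLinL [] lo = (0, 0) from rfl, pvComb_zero_right hS]
      rfl
  | cons p t ih =>
      intro lo mx res hS
      rcases p with ⟨a, b⟩
      have hmx : 0 ≤ mx := by
        rcases hS with h | h
        · exact le_of_lt h
        · rw [Prod.mk.injEq] at h; omega
      have hS' : pvS (pvComb (mx, res) (pvLeaf lo (a, b))) := pvS_comb hS (pvS_leaf lo (a, b))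
      rw [PySem.List.enumerate_cons, List.foldl_cons, pvStepA_comb lo mx res a b hmx]
      have hrec := ih (lo + 1) (pvComb (mx, res) (pvLeaf lo (a, b))).1
        (pvComb (mx, res) (pvLeaf lo (a, b))).2 (by rw [Prod.mk.eta]; exact hS')
      rw [Prod.mk.eta] at hrec
      rw [show ((lo + 1 : Nat) : Int) = (lo : Int) + 1 by push_cast; ring] at hrec
      rw [hrec, show pvLinL ((a, b) :: t) lo = pvComb (pvLeaf lo (a, b)) (pvLinL t (lo + 1)) from rfl,
          ← pvComb_assoc]

theorem pvPorts_eq (n : Int) (responses : List (Int × Int)) :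
    solve n responses = solve_alt n responses := by
  unfold solve solve_alt
  have hA := pvFoldA responses 0 0 0 (Or.inr rfl)
  rw [show ((0 : Nat) : Int) = (0 : Int) from rfl] at hA
  show (List.foldl pvStepA (0, 0) (PySem.List.enumerate responses 0)).1 = _
  rw [hA, pvComb_zero_left (pvS_linL responses 0),
      pvBestDC_eq_lin responses (responses.length - 0) 0 responses.length rfl,
      pvLin_eq_linL responses responses 0 rfl]

-- ===== VERDICT (by name: the statement is the Claim_ definition above) =====
theorem solve_spec : Claim_equal_solve := by
  intro n responses _
  unfold Spec_solve
  exact pvPorts_eq n responses
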